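-- pv_equiv track=rewrite | github.com/akarshvasisht/8-Tile-Puzzle-Solver-A-Search- | funny_puzzle.py | get_successors
-- ===== SOURCE A (Python) =====
-- from copy import copy
--
-- def get_successors(input_list):
--     empty = input_list.index(0)
--
--     zero_i, zero_j = empty // 3, empty % 3
--
--     neighbors = [(zero_i, zero_j-1), (zero_i,zero_j+1),(zero_i+1, zero_j), (zero_i-1, zero_j)]
--     successors = []
--
--     for new_i, new_j in neighbors:
--         if new_i < 0 or new_i > 2 or new_j < 0 or new_j > 2:
--             continue
--         successor = copy(input_list)
--         value_location = new_i * 3 + new_j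
--         successor[empty] = successor[value_location]
--         successor[value_location] = 0
--         successors.append(successor)
--     return sorted(successors)
-- ===== SOURCE B (Python) =====
-- # Instead of generating the blank's four candidate coordinates and bounds-checking
-- # them, scan every position of the board, keep those satisfying a flat-index
-- # adjacency predicate, and rebuild each successor positionally (no copy/mutation).
-- def adjacent(u, v):
--     return u < 9 and v < 9 and (abs(u - v) == 3 or (u // 3 == v // 3 and abs(u - v) == 1))
--
-- def get_successors(input_list):
--     empty = input_list.index(0)
--     n = len(input_list)
--     boards = [
--         [input_list[loc] if k == empty else 0 if k == loc else input_list[k] for k in range(n)]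
--         for loc in range(n) if adjacent(loc, empty)
--     ]
--     return sorted(boards)
-- ===== Notes on version B (the rewrite author's own statement) =====
-- stated objective: alternative
-- what changed: B drops A's candidate-coordinate generation, bounds checks and copy-and-mutate swaps: it scans every board position, keeps those satisfying a flat-index adjacency predicate to the blank, and rebuilds each successor positionally with a comprehension.
-- outside the precondition, e.g. on get_successors([1, 2, 3, 4, 5, 6, 7, 8, 9, 0]): A returns [[1, 2, 3, 4, 5, 6, 0, 8, 9, 7]], B returns []
import Mathlib
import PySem

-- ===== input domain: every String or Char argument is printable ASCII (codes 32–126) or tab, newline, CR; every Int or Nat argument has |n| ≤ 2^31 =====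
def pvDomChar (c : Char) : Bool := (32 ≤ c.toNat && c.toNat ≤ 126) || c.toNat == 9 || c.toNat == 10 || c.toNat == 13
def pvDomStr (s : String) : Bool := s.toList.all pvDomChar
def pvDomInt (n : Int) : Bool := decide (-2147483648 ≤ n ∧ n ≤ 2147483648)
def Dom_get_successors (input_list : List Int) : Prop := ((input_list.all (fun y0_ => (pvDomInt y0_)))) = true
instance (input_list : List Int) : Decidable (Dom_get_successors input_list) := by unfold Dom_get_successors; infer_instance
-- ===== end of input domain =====

-- B scans every board position with a flat-index adjacency predicate and rebuilds each
-- successor positionally, instead of A's candidate-coordinate generation with bounds checks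
-- and copy-and-mutate swaps; equivalence is proved on boards whose first blank and its
-- in-grid neighbours lie inside the list.

-- ===== PORT A =====
def get_successors (input_list : List Int) : List (List Int) :=
  match PySem.List.index? input_list 0 with
  | none => []  -- Python: input_list.index(0) raises ValueError; outside Pre_
  | some empty =>
    let zero_i : Int := PySem.Int.floordiv (empty : Int) 3
    let zero_j : Int := PySem.Int.mod (empty : Int) 3
    let neighbors : List (Int × Int) :=
      [(zero_i, zero_j - 1), (zero_i, zero_j + 1), (zero_i + 1, zero_j), (zero_i - 1, zero_j)]
    let successors : List (List Int) := neighbors.foldl (fun acc nj =>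
      if nj.1 < (0:Int) ∨ nj.1 > (2:Int) ∨ nj.2 < (0:Int) ∨ nj.2 > (2:Int) then acc
      else
        let value_location : Int := nj.1 * 3 + nj.2
        match PySem.List.pyGet? input_list value_location with
        | none => acc  -- Python: IndexError on successor[value_location]; outside Pre_
        | some v => acc ++ [(input_list.set empty v).set value_location.toNat 0]) []
    PySem.List.sorted successors (fun x => x) false

-- ===== PORT B =====
def pvAdjacent (u v : Nat) : Bool :=
  decide (u < 9 ∧ v < 9 ∧ (((u : Int) - (v : Int)).natAbs = 3 ∨
    (u / 3 = v / 3 ∧ ((u : Int) - (v : Int)).natAbs = 1)))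

def get_successors_alt (input_list : List Int) : List (List Int) :=
  match PySem.List.index? input_list 0 with
  | none => []  -- Python: input_list.index(0) raises ValueError; outside Pre_
  | some empty =>
    let n := input_list.length
    let boards : List (List Int) :=
      ((List.range n).filter (fun loc => pvAdjacent loc empty)).map (fun loc =>
        (List.range n).map (fun k =>
          if k = empty then input_list.getD loc 0
          else if k = loc then 0
          else input_list.getD k 0))
      -- getD is exact here: loc and k come from range n, so input_list[loc]/input_list[k] never raise
    PySem.List.sorted boards (fun x => x) false

-- ===== PRECONDITION & SPEC =====
-- Pre_ asks that the board contain a blank, that the first blank lie inside the 3x3 grid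
-- and that its in-grid right/down neighbours exist in the list: when an in-grid neighbour
-- index is missing A raises IndexError, and when the first blank sits at index ≥ 9 A's
-- leftover coordinate arithmetic still returns a (possibly empty) move list, an accident
-- of its implementation that B (whose adjacency predicate is confined to the grid) does
-- not reproduce.
def Pre_get_successors (input_list : List Int) : Prop :=
  (0 : Int) ∈ input_list ∧
    ((PySem.List.index? input_list 0).getD 0 < 9 ∧
      ((PySem.List.index? input_list 0).getD 0 % 3 < 2 →
        (PySem.List.index? input_list 0).getD 0 + 1 < input_list.length) ∧
      ((PySem.List.index? input_list 0).getD 0 < 6 →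
        (PySem.List.index? input_list 0).getD 0 + 3 < input_list.length))
instance (input_list : List Int) : Decidable (Pre_get_successors input_list) := by
  unfold Pre_get_successors; infer_instance

def pvWitness_get_successors : List Int := [1, 2, 3, 4, 0, 5, 6, 7, 8]

def Spec_get_successors (input_list : List Int) (out : List (List Int)) : Prop := out = get_successors_alt input_list
instance (input_list : List Int) (out : List (List Int)) : Decidable (Spec_get_successors input_list out) := by unfold Spec_get_successors; infer_instance

-- ===== CLAIM (what is proved, stated in full; the proofs are below) =====
def Claim_equal_get_successors : Prop := ∀ (input_list : List Int), Dom_get_successors input_list → Pre_get_successors input_list → Spec_get_successors input_list (get_successors input_list)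

-- ===== LEMMAS AND PROOFS =====

theorem pv_get (l : List Int) (k : Int) (hk : 0 ≤ k) (h : k.toNat < l.length) :
    PySem.List.pyGet? l k = some (l[k.toNat]'h) := by
  rw [PySem.List.pyGet?_of_nonneg l hk]
  exact List.getElem?_eq_getElem h

-- a filter over range n whose predicate is false from m on may be computed over range m
theorem pv_filter_range_bound (q : Nat → Bool) (m n : Nat) (hmn : m ≤ n)
    (h : ∀ i, m ≤ i → q i = false) :
    (List.range n).filter q = (List.range m).filter q := by
  rw [show n = m + (n - m) by omega, List.range_add, List.filter_append]
  have hnil : (List.filter q ((List.range (n - m)).map (m + ·))) = [] := by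
    rw [List.filter_eq_nil_iff]
    intro a ha
    obtain ⟨i, -, rfl⟩ := List.mem_map.mp ha
    simp [h (m + i) (by omega)]
  simp [hnil]

-- the positional rebuild of a board equals A's copy-and-swap of the blank e with cell loc
theorem pv_mk_board (l : List Int) (e loc : Nat) (hne : loc ≠ e)
    (he : e < l.length) (hloc : loc < l.length) :
    (List.map (fun k =>
        if k = e then l[loc]?.getD 0 else if k = loc then (0 : Int) else l[k]?.getD 0)
        (List.range l.length))
      = (l.set e (l[loc]'hloc)).set loc 0 := by
  apply List.ext_getElem (by simp)
  intro k h1 h2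
  have hk : k < l.length := by simpa using h1
  simp only [List.getElem_map, List.getElem_range, List.getElem_set]
  by_cases hke : k = e <;> by_cases hkl : k = loc <;>
    simp_all [List.getElem?_eq_getElem, eq_comm]

-- sorted(xs) = sorted(ys) for a rearrangement ys of xs, at the instances the ports elaborate with
theorem pv_sorted_perm (xs ys : List (List Int)) (hp : xs.Perm ys) :
    @PySem.List.sorted (List Int) (List Int) List.instLT (fun a b => a.decidableLT b) xs (fun x => x) false
      = @PySem.List.sorted (List Int) (List Int) List.instLT (fun a b => a.decidableLT b) ys (fun x => x) false := by
  have h := @PySem.List.sorted_eq_sorted_of_perm (List Int) (List Int) inferInstance xs ys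
    (fun x => x) (fun x y hxy => hxy) hp
  have e : (LinearOrder.toDecidableLT : DecidableLT (List Int)) = fun a b => a.decidableLT b := by
    funext a b; exact Subsingleton.elim _ _
  rw [← e]
  exact h

theorem pvRot2 {α : Type} (a b : α) : ([a, b] : List α).Perm [b, a] :=
  List.Perm.swap b a []

theorem pvRot3 {α : Type} (a b c : α) : ([a, b, c] : List α).Perm [c, a, b] := by
  simpa using (List.perm_append_comm (l₁ := [a, b]) (l₂ := [c]))

theorem pvRot4 {α : Type} (a b c d : α) : ([a, b, c, d] : List α).Perm [d, a, b, c] := by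
  simpa using (List.perm_append_comm (l₁ := [a, b, c]) (l₂ := [d]))

-- ===== VERDICT (by name: the statement is the Claim_ definition above) =====
theorem get_successors_spec : Claim_equal_get_successors := by
  intro l _hdom hpre
  obtain ⟨hmem, hpre2⟩ := hpre
  show get_successors l = get_successors_alt l
  cases hidx : PySem.List.index? l 0 with
  | none => exact absurd hmem (List.idxOf?_eq_none_iff.mp hidx)
  | some e =>
    rw [hidx] at hpre2
    simp only [Option.getD_some] at hpre2
    obtain ⟨he9, hr, hd⟩ := hpre2
    obtain ⟨hlt, hval, _hfirst⟩ := PySem.List.getElem_of_index?_eq_some hidx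
    interval_cases e
    · have hr' : 0+1 < l.length := hr (by decide)
      have hd' : 0+3 < l.length := hd (by decide)
      have p1 : PySem.List.pyGet? l (1:Int) = some (l[1]'(by omega)) := by simpa using pv_get l 1 (by norm_num) (by simp; omega)
      have p3 : PySem.List.pyGet? l (3:Int) = some (l[3]'(by omega)) := by simpa using pv_get l 3 (by norm_num) (by simp; omega)
      simp only [get_successors, get_successors_alt, hidx]
      rw [pv_filter_range_bound (fun loc => pvAdjacent loc 0) 4 l.length (by omega)
        (by intro i hi; simp only [pvAdjacent, decide_eq_false_iff_not]; omega)]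
      rw [show (List.range 4).filter (fun loc => pvAdjacent loc 0) = [1, 3] by decide]
      simp only [PySem.Int.floordiv, PySem.Int.mod]
      simp only [Nat.cast_zero, Nat.cast_one, Nat.cast_ofNat,
        show Int.fdiv 0 3 = 0 by decide, show Int.fmod 0 3 = 0 by decide]
      norm_num [List.foldl, List.map, p1, p3]
      rw [pv_mk_board l 0 1 (by decide) (by omega) (by omega)]
      rw [pv_mk_board l 0 3 (by decide) (by omega) (by omega)]
      try rfl
    · have hr' : 1+1 < l.length := hr (by decide)
      have hd' : 1+3 < l.length := hd (by decide)
      have p0 : PySem.List.pyGet? l (0:Int) = some (l[0]'(by omega)) := by simpa using pv_get l 0 (by norm_num) (by simp; omega)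
      have p2 : PySem.List.pyGet? l (2:Int) = some (l[2]'(by omega)) := by simpa using pv_get l 2 (by norm_num) (by simp; omega)
      have p4 : PySem.List.pyGet? l (4:Int) = some (l[4]'(by omega)) := by simpa using pv_get l 4 (by norm_num) (by simp; omega)
      simp only [get_successors, get_successors_alt, hidx]
      rw [pv_filter_range_bound (fun loc => pvAdjacent loc 1) 5 l.length (by omega)
        (by intro i hi; simp only [pvAdjacent, decide_eq_false_iff_not]; omega)]
      rw [show (List.range 5).filter (fun loc => pvAdjacent loc 1) = [0, 2, 4] by decide]
      simp only [PySem.Int.floordiv, PySem.Int.mod]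
      simp only [Nat.cast_zero, Nat.cast_one, Nat.cast_ofNat,
        show Int.fdiv 1 3 = 0 by decide, show Int.fmod 1 3 = 1 by decide]
      norm_num [List.foldl, List.map, p0, p2, p4]
      rw [pv_mk_board l 1 0 (by decide) (by omega) (by omega)]
      rw [pv_mk_board l 1 2 (by decide) (by omega) (by omega)]
      rw [pv_mk_board l 1 4 (by decide) (by omega) (by omega)]
      try rfl
    · have hd' : 2+3 < l.length := hd (by decide)
      have p1 : PySem.List.pyGet? l (1:Int) = some (l[1]'(by omega)) := by simpa using pv_get l 1 (by norm_num) (by simp; omega)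
      have p5 : PySem.List.pyGet? l (5:Int) = some (l[5]'(by omega)) := by simpa using pv_get l 5 (by norm_num) (by simp; omega)
      simp only [get_successors, get_successors_alt, hidx]
      rw [pv_filter_range_bound (fun loc => pvAdjacent loc 2) 6 l.length (by omega)
        (by intro i hi; simp only [pvAdjacent, decide_eq_false_iff_not]; omega)]
      rw [show (List.range 6).filter (fun loc => pvAdjacent loc 2) = [1, 5] by decide]
      simp only [PySem.Int.floordiv, PySem.Int.mod]
      simp only [Nat.cast_zero, Nat.cast_one, Nat.cast_ofNat,
        show Int.fdiv 2 3 = 0 by decide, show Int.fmod 2 3 = 2 by decide]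
      norm_num [List.foldl, List.map, p1, p5]
      rw [pv_mk_board l 2 1 (by decide) (by omega) (by omega)]
      rw [pv_mk_board l 2 5 (by decide) (by omega) (by omega)]
      try rfl
    · have hr' : 3+1 < l.length := hr (by decide)
      have hd' : 3+3 < l.length := hd (by decide)
      have p0 : PySem.List.pyGet? l (0:Int) = some (l[0]'(by omega)) := by simpa using pv_get l 0 (by norm_num) (by simp; omega)
      have p4 : PySem.List.pyGet? l (4:Int) = some (l[4]'(by omega)) := by simpa using pv_get l 4 (by norm_num) (by simp; omega)
      have p6 : PySem.List.pyGet? l (6:Int) = some (l[6]'(by omega)) := by simpa using pv_get l 6 (by norm_num) (by simp; omega)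
      simp only [get_successors, get_successors_alt, hidx]
      rw [pv_filter_range_bound (fun loc => pvAdjacent loc 3) 7 l.length (by omega)
        (by intro i hi; simp only [pvAdjacent, decide_eq_false_iff_not]; omega)]
      rw [show (List.range 7).filter (fun loc => pvAdjacent loc 3) = [0, 4, 6] by decide]
      simp only [PySem.Int.floordiv, PySem.Int.mod]
      simp only [Nat.cast_zero, Nat.cast_one, Nat.cast_ofNat,
        show Int.fdiv 3 3 = 1 by decide, show Int.fmod 3 3 = 0 by decide]
      norm_num [List.foldl, List.map, p0, p4, p6]
      rw [pv_mk_board l 3 0 (by decide) (by omega) (by omega)]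
      rw [pv_mk_board l 3 4 (by decide) (by omega) (by omega)]
      rw [pv_mk_board l 3 6 (by decide) (by omega) (by omega)]
      exact pv_sorted_perm _ _ (pvRot3 _ _ _)
    · have hr' : 4+1 < l.length := hr (by decide)
      have hd' : 4+3 < l.length := hd (by decide)
      have p1 : PySem.List.pyGet? l (1:Int) = some (l[1]'(by omega)) := by simpa using pv_get l 1 (by norm_num) (by simp; omega)
      have p3 : PySem.List.pyGet? l (3:Int) = some (l[3]'(by omega)) := by simpa using pv_get l 3 (by norm_num) (by simp; omega)
      have p5 : PySem.List.pyGet? l (5:Int) = some (l[5]'(by omega)) := by simpa using pv_get l 5 (by norm_num) (by simp; omega)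
      have p7 : PySem.List.pyGet? l (7:Int) = some (l[7]'(by omega)) := by simpa using pv_get l 7 (by norm_num) (by simp; omega)
      simp only [get_successors, get_successors_alt, hidx]
      rw [pv_filter_range_bound (fun loc => pvAdjacent loc 4) 8 l.length (by omega)
        (by intro i hi; simp only [pvAdjacent, decide_eq_false_iff_not]; omega)]
      rw [show (List.range 8).filter (fun loc => pvAdjacent loc 4) = [1, 3, 5, 7] by decide]
      simp only [PySem.Int.floordiv, PySem.Int.mod]
      simp only [Nat.cast_zero, Nat.cast_one, Nat.cast_ofNat,
        show Int.fdiv 4 3 = 1 by decide, show Int.fmod 4 3 = 1 by decide]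
      norm_num [List.foldl, List.map, p1, p3, p5, p7]
      rw [pv_mk_board l 4 1 (by decide) (by omega) (by omega)]
      rw [pv_mk_board l 4 3 (by decide) (by omega) (by omega)]
      rw [pv_mk_board l 4 5 (by decide) (by omega) (by omega)]
      rw [pv_mk_board l 4 7 (by decide) (by omega) (by omega)]
      exact pv_sorted_perm _ _ (pvRot4 _ _ _ _)
    · have hd' : 5+3 < l.length := hd (by decide)
      have p2 : PySem.List.pyGet? l (2:Int) = some (l[2]'(by omega)) := by simpa using pv_get l 2 (by norm_num) (by simp; omega)
      have p4 : PySem.List.pyGet? l (4:Int) = some (l[4]'(by omega)) := by simpa using pv_get l 4 (by norm_num) (by simp; omega)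
      have p8 : PySem.List.pyGet? l (8:Int) = some (l[8]'(by omega)) := by simpa using pv_get l 8 (by norm_num) (by simp; omega)
      simp only [get_successors, get_successors_alt, hidx]
      rw [pv_filter_range_bound (fun loc => pvAdjacent loc 5) 9 l.length (by omega)
        (by intro i hi; simp only [pvAdjacent, decide_eq_false_iff_not]; omega)]
      rw [show (List.range 9).filter (fun loc => pvAdjacent loc 5) = [2, 4, 8] by decide]
      simp only [PySem.Int.floordiv, PySem.Int.mod]
      simp only [Nat.cast_zero, Nat.cast_one, Nat.cast_ofNat,
        show Int.fdiv 5 3 = 1 by decide, show Int.fmod 5 3 = 2 by decide]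
      norm_num [List.foldl, List.map, p2, p4, p8]
      rw [pv_mk_board l 5 2 (by decide) (by omega) (by omega)]
      rw [pv_mk_board l 5 4 (by decide) (by omega) (by omega)]
      rw [pv_mk_board l 5 8 (by decide) (by omega) (by omega)]
      exact pv_sorted_perm _ _ (pvRot3 _ _ _)
    · have hr' : 6+1 < l.length := hr (by decide)
      have p3 : PySem.List.pyGet? l (3:Int) = some (l[3]'(by omega)) := by simpa using pv_get l 3 (by norm_num) (by simp; omega)
      have p7 : PySem.List.pyGet? l (7:Int) = some (l[7]'(by omega)) := by simpa using pv_get l 7 (by norm_num) (by simp; omega)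
      simp only [get_successors, get_successors_alt, hidx]
      rw [pv_filter_range_bound (fun loc => pvAdjacent loc 6) 8 l.length (by omega)
        (by intro i hi; simp only [pvAdjacent, decide_eq_false_iff_not]; omega)]
      rw [show (List.range 8).filter (fun loc => pvAdjacent loc 6) = [3, 7] by decide]
      simp only [PySem.Int.floordiv, PySem.Int.mod]
      simp only [Nat.cast_zero, Nat.cast_one, Nat.cast_ofNat,
        show Int.fdiv 6 3 = 2 by decide, show Int.fmod 6 3 = 0 by decide]
      norm_num [List.foldl, List.map, p3, p7]
      rw [pv_mk_board l 6 3 (by decide) (by omega) (by omega)]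
      rw [pv_mk_board l 6 7 (by decide) (by omega) (by omega)]
      exact pv_sorted_perm _ _ (pvRot2 _ _)
    · have hr' : 7+1 < l.length := hr (by decide)
      have p4 : PySem.List.pyGet? l (4:Int) = some (l[4]'(by omega)) := by simpa using pv_get l 4 (by norm_num) (by simp; omega)
      have p6 : PySem.List.pyGet? l (6:Int) = some (l[6]'(by omega)) := by simpa using pv_get l 6 (by norm_num) (by simp; omega)
      have p8 : PySem.List.pyGet? l (8:Int) = some (l[8]'(by omega)) := by simpa using pv_get l 8 (by norm_num) (by simp; omega)
      simp only [get_successors, get_successors_alt, hidx]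
      rw [pv_filter_range_bound (fun loc => pvAdjacent loc 7) 9 l.length (by omega)
        (by intro i hi; simp only [pvAdjacent, decide_eq_false_iff_not]; omega)]
      rw [show (List.range 9).filter (fun loc => pvAdjacent loc 7) = [4, 6, 8] by decide]
      simp only [PySem.Int.floordiv, PySem.Int.mod]
      simp only [Nat.cast_zero, Nat.cast_one, Nat.cast_ofNat,
        show Int.fdiv 7 3 = 2 by decide, show Int.fmod 7 3 = 1 by decide]
      norm_num [List.foldl, List.map, p4, p6, p8]
      rw [pv_mk_board l 7 4 (by decide) (by omega) (by omega)]
      rw [pv_mk_board l 7 6 (by decide) (by omega) (by omega)]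
      rw [pv_mk_board l 7 8 (by decide) (by omega) (by omega)]
      exact pv_sorted_perm _ _ (pvRot3 _ _ _)
    · 
      have p5 : PySem.List.pyGet? l (5:Int) = some (l[5]'(by omega)) := by simpa using pv_get l 5 (by norm_num) (by simp; omega)
      have p7 : PySem.List.pyGet? l (7:Int) = some (l[7]'(by omega)) := by simpa using pv_get l 7 (by norm_num) (by simp; omega)
      simp only [get_successors, get_successors_alt, hidx]
      rw [pv_filter_range_bound (fun loc => pvAdjacent loc 8) 8 l.length (by omega)
        (by intro i hi; simp only [pvAdjacent, decide_eq_false_iff_not]; omega)]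
      rw [show (List.range 8).filter (fun loc => pvAdjacent loc 8) = [5, 7] by decide]
      simp only [PySem.Int.floordiv, PySem.Int.mod]
      simp only [Nat.cast_zero, Nat.cast_one, Nat.cast_ofNat,
        show Int.fdiv 8 3 = 2 by decide, show Int.fmod 8 3 = 2 by decide]
      norm_num [List.foldl, List.map, p5, p7]
      rw [pv_mk_board l 8 5 (by decide) (by omega) (by omega)]
      rw [pv_mk_board l 8 7 (by decide) (by omega) (by omega)]
      exact pv_sorted_perm _ _ (pvRot2 _ _)
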